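-- pv_equiv track=rewrite | github.com/ppsmk388/P-GED | rank_gen.py | weighted_scoring_mMethod
-- ===== SOURCE A (Python) =====
-- from collections import defaultdict
--
-- def weighted_scoring_mMethod(rankings):
--     node_scores = defaultdict(int)
--     for ranking in rankings:
--         for rank, nodes in enumerate(ranking):
--             score = len(ranking) - rank
--             for node in nodes:
--                 node_scores[node] += score
--     sorted_nodes = sorted(node_scores.items(), key=lambda x: x[1], reverse=True)
--     combined_ranking = []
--     current_score = None
--     current_group = []
--     for node, score in sorted_nodes:
--         if score != current_score:
--             if current_group:
--                 combined_ranking.append(current_group)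
--             current_group = [node]
--             current_score = score
--         else:
--             current_group.append(node)
--     if current_group:
--         combined_ranking.append(current_group)
--     return combined_ranking
-- ===== SOURCE B (Python) =====
-- from collections import defaultdict
--
-- def weighted_scoring_mMethod(rankings):
--     node_scores = defaultdict(int)
--     for ranking in rankings:
--         for rank, nodes in enumerate(ranking):
--             score = len(ranking) - rank
--             for node in nodes:
--                 node_scores[node] += score
--     groups = defaultdict(list)
--     for node, score in node_scores.items():
--         groups[score].append(node)
--     return [groups[s] for s in sorted(groups, reverse=True)]
-- ===== Notes on version B (the rewrite author's own statement) =====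
-- stated objective: alternative
-- what changed: The sort-all-(node,score)-items-then-sequentially-group pass is replaced by bucketing nodes into a score->nodes dict and sorting only the distinct scores descending.
import Mathlib
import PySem

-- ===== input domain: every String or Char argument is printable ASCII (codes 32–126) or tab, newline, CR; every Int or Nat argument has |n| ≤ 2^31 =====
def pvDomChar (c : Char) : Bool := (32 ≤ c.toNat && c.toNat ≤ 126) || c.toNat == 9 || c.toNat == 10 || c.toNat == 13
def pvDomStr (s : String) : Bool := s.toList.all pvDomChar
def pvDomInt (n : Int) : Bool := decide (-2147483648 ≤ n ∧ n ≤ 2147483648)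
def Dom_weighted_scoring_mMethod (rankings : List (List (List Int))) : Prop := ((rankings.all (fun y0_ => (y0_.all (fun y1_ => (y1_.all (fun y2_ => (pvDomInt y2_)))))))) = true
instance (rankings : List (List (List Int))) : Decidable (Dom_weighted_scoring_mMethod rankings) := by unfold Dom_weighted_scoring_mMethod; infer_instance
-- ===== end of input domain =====

-- B replaces A's sort-all-items-then-sequentially-group pass by a score→nodes bucket dict plus a
-- sort of the distinct scores only (objective: alternative/simpler grouping; same return value).

-- ===== PORT A =====
-- the aggregation loop (node_scores) is textually identical in A and in B, so both ports share it
def pvNodeScores (rankings : List (List (List Int))) : PySem.Dict Int Int :=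
  rankings.foldl (fun d ranking =>
    (PySem.List.enumerate ranking).foldl (fun d rn =>
      rn.2.foldl (fun d node => d.modify node 0 (fun v => v + ((ranking.length : Int) - rn.1))) d) d)
    PySem.Dict.empty

-- one step of A's grouping loop: state = (combined_ranking, current_score, current_group)
def pvStepA (st : List (List Int) × Option Int × List Int) (p : Int × Int) :
    List (List Int) × Option Int × List Int :=
  if some p.2 ≠ st.2.1 then
    ((if st.2.2 ≠ [] then st.1 ++ [st.2.2] else st.1), some p.2, [p.1])
  else (st.1, st.2.1, st.2.2 ++ [p.1])

-- the final 'if current_group: combined_ranking.append(current_group)'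
def pvFinishA (st : List (List Int) × Option Int × List Int) : List (List Int) :=
  if st.2.2 ≠ [] then st.1 ++ [st.2.2] else st.1

def weighted_scoring_mMethod (rankings : List (List (List Int))) : List (List Int) :=
  let sorted_nodes := PySem.List.sorted (pvNodeScores rankings).items (fun p => p.2) true
  pvFinishA (sorted_nodes.foldl pvStepA (([] : List (List Int)), (none : Option Int), ([] : List Int)))

-- ===== PORT B =====
def weighted_scoring_mMethod_alt (rankings : List (List (List Int))) : List (List Int) :=
  let groups : PySem.Dict Int (List Int) :=
    (pvNodeScores rankings).items.foldl
      (fun d p => d.modify p.2 ([] : List Int) (fun v => v ++ [p.1])) PySem.Dict.empty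
  (PySem.List.sorted groups.keys (fun s => s) true).map (fun s => groups.getD s [])

-- ===== PRECONDITION & SPEC =====
def Spec_weighted_scoring_mMethod (rankings : List (List (List Int))) (out : List (List Int)) : Prop := out = weighted_scoring_mMethod_alt rankings
instance (rankings : List (List (List Int))) (out : List (List Int)) : Decidable (Spec_weighted_scoring_mMethod rankings out) := by unfold Spec_weighted_scoring_mMethod; infer_instance

-- ===== CLAIM (what is proved, stated in full; the proofs are below) =====
def Claim_equal_weighted_scoring_mMethod : Prop := ∀ (rankings : List (List (List Int))), Dom_weighted_scoring_mMethod rankings → Spec_weighted_scoring_mMethod rankings (weighted_scoring_mMethod rankings)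

-- ===== LEMMAS AND PROOFS =====

-- the items of the score dict that carry a given score s, i.e. one bucket of B's groups dict
def pvBucket (l : List (Int × Int)) (s : Int) : List (Int × Int) :=
  l.filter (fun p => p.2 == s)

theorem pvInsertBy_cons {α : Type} (before : α → α → Bool) (x y : α) (ys : List α) :
    PySem.List.insertBy before x (y :: ys) =
      if before x y then x :: y :: ys else y :: PySem.List.insertBy before x ys := rfl

theorem pvInsertBy_skip {α : Type} (before : α → α → Bool) (x : α) (as bs : List α)
    (h : ∀ y ∈ as, before x y = false) :
    PySem.List.insertBy before x (as ++ bs) = as ++ PySem.List.insertBy before x bs := by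
  induction as with
  | nil => simp
  | cons a t ih =>
    rw [List.cons_append, pvInsertBy_cons, if_neg (by simp [h a (by simp)]),
      ih (fun y hy => h y (by simp [hy])), List.cons_append]

theorem pvInsertBy_head {α : Type} (before : α → α → Bool) (x : α) (ys : List α)
    (h : ∀ y ∈ ys, before x y = true) :
    PySem.List.insertBy before x ys = x :: ys := by
  cases ys with
  | nil => rfl
  | cons y t => rw [pvInsertBy_cons, if_pos (h y (by simp))]

theorem pvInsert_block_mem (D : List Int) (g : Int → List (Int × Int)) (x : Int × Int)
    (hD : D.Pairwise (· > ·)) (hg : ∀ s ∈ D, ∀ p ∈ g s, p.2 = s) (ht : x.2 ∈ D) :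
    PySem.List.insertBy (fun a b => decide (b.2 < a.2)) x (D.flatMap g)
      = D.flatMap (fun s => g s ++ if s = x.2 then [x] else []) := by
  induction D with
  | nil => cases ht
  | cons s D ih =>
    obtain ⟨hDhead, hDtail⟩ := List.pairwise_cons.mp hD
    rw [List.flatMap_cons, List.flatMap_cons]
    rcases List.mem_cons.mp ht with hsx | hmem
    · -- s = x.2 : x goes at the end of this block, before everything after it
      subst hsx
      rw [pvInsertBy_skip _ _ _ _ (by
        intro y hy
        simp [hg _ (by simp) y hy])]
      rw [pvInsertBy_head _ _ _ (by
        intro y hy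
        obtain ⟨t, htD, hyt⟩ := List.mem_flatMap.mp hy
        have h2 : y.2 = t := hg t (by simp [htD]) y hyt
        simp only [h2, decide_eq_true_eq]
        exact hDhead t htD)]
      rw [if_pos rfl]
      rw [show (D.flatMap fun t => g t ++ if t = x.2 then [x] else []) = D.flatMap g from
        List.flatMap_congr (fun t htD => by
          rw [if_neg (ne_of_lt (hDhead t htD)), List.append_nil])]
      simp
    · -- x.2 strictly below s : skip this block and recurse
      have hxs : x.2 < s := hDhead _ hmem
      rw [pvInsertBy_skip _ _ _ _ (by
        intro y hy
        have h2 : y.2 = s := hg s (by simp) y hy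
        simp only [h2, decide_eq_false_iff_not, not_lt]
        exact le_of_lt hxs)]
      rw [ih hDtail (fun t htD => hg t (by simp [htD])) hmem,
        if_neg (ne_of_gt hxs), List.append_nil]


theorem pvInsert_block_new (D : List Int) (g : Int → List (Int × Int)) (x : Int × Int)
    (hD : D.Pairwise (· > ·)) (hg : ∀ s ∈ D, ∀ p ∈ g s, p.2 = s) (ht : x.2 ∉ D) :
    PySem.List.insertBy (fun a b => decide (b.2 < a.2)) x (D.flatMap g)
      = (PySem.List.insertBy (fun a b => decide (b < a)) x.2 D).flatMap
          (fun s => if s = x.2 then [x] else g s) := by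
  induction D with
  | nil => simp [PySem.List.insertBy]
  | cons s D ih =>
    obtain ⟨hDhead, hDtail⟩ := List.pairwise_cons.mp hD
    have hsx : s ≠ x.2 := fun h => ht (by simp [h])
    rw [List.flatMap_cons]
    by_cases hlt : s < x.2
    · -- x goes in front of everything
      rw [pvInsertBy_head _ _ _ (by
        intro y hy
        rcases List.mem_append.mp hy with h1 | h2
        · have h3 : y.2 = s := hg s (by simp) y h1
          simp [h3, hlt]
        · obtain ⟨t, htD, hyt⟩ := List.mem_flatMap.mp h2
          have h3 : y.2 = t := hg t (by simp [htD]) y hyt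
          simp only [h3, decide_eq_true_eq]
          exact lt_trans (hDhead t htD) hlt)]
      rw [pvInsertBy_cons, if_pos (by simp [hlt]), List.flatMap_cons, List.flatMap_cons,
        if_pos rfl, if_neg hsx]
      rw [show (D.flatMap fun t => if t = x.2 then [x] else g t) = D.flatMap g from
        List.flatMap_congr (fun t htD =>
          if_neg (ne_of_lt (lt_trans (hDhead t htD) hlt)))]
      rfl
    · -- x.2 < s : skip this block and recurse
      have hxs : x.2 < s := lt_of_le_of_ne (le_of_not_gt hlt) (fun h => hsx h.symm)
      rw [pvInsertBy_skip _ _ _ _ (by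
        intro y hy
        have h2 : y.2 = s := hg s (by simp) y hy
        simp only [h2, decide_eq_false_iff_not, not_lt]
        exact le_of_lt hxs)]
      rw [ih hDtail (fun t htD => hg t (by simp [htD])) (fun h => ht (by simp [h])),
        pvInsertBy_cons, if_neg (by simp [hlt]), List.flatMap_cons, if_neg hsx]


theorem pvSortedDesc_pairwise_gt (xs : List Int) :
    (PySem.List.sorted (PySem.Set.ofList xs) (fun s => s) true).Pairwise (· > ·) := by
  have h1 := PySem.List.sorted_pairwise_rev (PySem.Set.ofList xs) (fun s => s)
  have h2 : (PySem.List.sorted (PySem.Set.ofList xs) (fun s => s) true).Nodup :=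
    (PySem.List.sorted_perm (PySem.Set.ofList xs) (fun s => s) true).nodup_iff.mpr
      (PySem.Set.nodup_ofList xs)
  exact (h1.and h2).imp (fun h => lt_of_le_of_ne h.1 (Ne.symm h.2))


theorem pvBucket_key (l : List (Int × Int)) (s : Int) : ∀ p ∈ pvBucket l s, p.2 = s := by
  intro p hp
  simpa [pvBucket, List.mem_filter] using (List.mem_filter.mp hp).2

-- stable descending sort by score = the distinct scores in descending order, each replaced by its bucket
theorem pvSortedRev_blocks (l : List (Int × Int)) :
    PySem.List.sorted l (fun p => p.2) true
      = (PySem.List.sorted (PySem.Set.ofList (l.map (fun p => p.2))) (fun s => s) true).flatMap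
          (pvBucket l) := by
  induction l using List.reverseRecOn with
  | nil => rfl
  | append_singleton l x ih =>
    have hstep : PySem.List.sorted (l ++ [x]) (fun p => p.2) true
        = PySem.List.insertBy (fun a b => decide (b.2 < a.2)) x
            (PySem.List.sorted l (fun p => p.2) true) := by
      rw [PySem.List.sorted_rev_eq_foldl_insertBy, PySem.List.sorted_rev_eq_foldl_insertBy,
        List.foldl_append, List.foldl_cons, List.foldl_nil]
    have hofl : PySem.Set.ofList ((l ++ [x]).map (fun p => p.2))
        = PySem.Set.add (PySem.Set.ofList (l.map (fun p => p.2))) x.2 := by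
      rw [List.map_append]
      simp [PySem.Set.ofList_eq_foldl, List.foldl_append]
    have hD : (PySem.List.sorted (PySem.Set.ofList (l.map (fun p => p.2))) (fun s => s)
        true).Pairwise (· > ·) := pvSortedDesc_pairwise_gt _
    have hg : ∀ s ∈ PySem.List.sorted (PySem.Set.ofList (l.map (fun p => p.2))) (fun s => s) true,
        ∀ p ∈ pvBucket l s, p.2 = s := fun s _ => pvBucket_key l s
    have hbuck : ∀ s, pvBucket (l ++ [x]) s = pvBucket l s ++ if s = x.2 then [x] else [] := by
      intro s
      by_cases h : s = x.2
      · subst h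
        simp [pvBucket, List.filter_append]
      · have hxs : x.2 ≠ s := fun hh => h hh.symm
        simp [pvBucket, List.filter_append, h, hxs]
    by_cases hx : x.2 ∈ l.map (fun p => p.2)
    · have hadd : PySem.Set.add (PySem.Set.ofList (l.map (fun p => p.2))) x.2
          = PySem.Set.ofList (l.map (fun p => p.2)) := by
        simp [PySem.Set.add, PySem.Set.contains, (PySem.Set.mem_ofList _ _).mpr hx]
      have htD : x.2 ∈ PySem.List.sorted (PySem.Set.ofList (l.map (fun p => p.2)))
          (fun s => s) true :=
        (PySem.List.mem_sorted _ _ _ _).mpr ((PySem.Set.mem_ofList _ _).mpr hx)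
      rw [hstep, ih, hofl, hadd, pvInsert_block_mem _ (pvBucket l) x hD hg htD]
      exact List.flatMap_congr (fun s _ => (hbuck s).symm)
    · have hadd : PySem.Set.add (PySem.Set.ofList (l.map (fun p => p.2))) x.2
          = PySem.Set.ofList (l.map (fun p => p.2)) ++ [x.2] := by
        simp [PySem.Set.add, PySem.Set.contains]
        intro a ha
        exact hx (List.mem_map.mpr ⟨(a, x.2), ha, rfl⟩)
      have htD : x.2 ∉ PySem.List.sorted (PySem.Set.ofList (l.map (fun p => p.2)))
          (fun s => s) true := fun h =>
        hx ((PySem.Set.mem_ofList _ _).mp ((PySem.List.mem_sorted _ _ _ _).mp h))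
      have hDnew : PySem.List.sorted (PySem.Set.ofList (l.map (fun p => p.2)) ++ [x.2])
            (fun s => s) true
          = PySem.List.insertBy (fun a b => decide (b < a)) x.2
              (PySem.List.sorted (PySem.Set.ofList (l.map (fun p => p.2))) (fun s => s) true) := by
        rw [PySem.List.sorted_rev_eq_foldl_insertBy, PySem.List.sorted_rev_eq_foldl_insertBy,
          List.foldl_append, List.foldl_cons, List.foldl_nil]
      rw [hstep, ih, hofl, hadd, hDnew, pvInsert_block_new _ (pvBucket l) x hD hg htD]
      refine List.flatMap_congr (fun s hs => ?_)
      by_cases h : s = x.2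
      · rw [if_pos h, hbuck, if_pos h]
        have hnil : pvBucket l s = [] := by
          rw [pvBucket, List.filter_eq_nil_iff]
          intro p hp hps
          have hp2 : p.2 = s := by simpa using hps
          exact hx (List.mem_map.mpr ⟨p, hp, by rw [hp2, h]⟩)
        simp [hnil]
      · rw [if_neg h, hbuck, if_neg h, List.append_nil]


theorem pvFoldA_block (b : List (Int × Int)) (s : Int) (hb : ∀ p ∈ b, p.2 = s)
    (acc : List (List Int)) (grp : List Int) :
    b.foldl pvStepA (acc, some s, grp) = (acc, some s, grp ++ b.map (fun p => p.1)) := by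
  induction b generalizing grp with
  | nil => simp
  | cons p t ih =>
    have hp : p.2 = s := hb p (by simp)
    rw [List.foldl_cons, pvStepA, if_neg (by simp [hp]),
      ih (fun q hq => hb q (by simp [hq]))]
    simp

-- A's grouping loop over a concatenation of nonempty constant-score blocks with strictly
-- descending scores emits exactly one group per block
theorem pvFoldA_groups (D : List Int) (g : Int → List (Int × Int))
    (hD : D.Pairwise (· > ·)) (hg : ∀ s ∈ D, ∀ p ∈ g s, p.2 = s) (hne : ∀ s ∈ D, g s ≠ [])
    (acc : List (List Int)) (cur : Option Int) (grp : List Int)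
    (hcur : ∀ s ∈ D, cur ≠ some s) :
    pvFinishA ((D.flatMap g).foldl pvStepA (acc, cur, grp))
      = acc ++ (if grp ≠ [] then [grp] else []) ++ D.map (fun s => (g s).map (fun p => p.1)) := by
  induction D generalizing acc cur grp with
  | nil =>
    simp only [List.flatMap_nil, List.foldl_nil, List.map_nil, List.append_nil, pvFinishA]
    split_ifs <;> simp
  | cons s D ih =>
    obtain ⟨hDhead, hDtail⟩ := List.pairwise_cons.mp hD
    obtain ⟨p, b, hgs⟩ : ∃ p b, g s = p :: b := by
      cases h : g s with
      | nil => exact absurd h (hne s (by simp))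
      | cons p b => exact ⟨p, b, rfl⟩
    have hp : p.2 = s := hg s (by simp) p (by simp [hgs])
    rw [List.flatMap_cons, hgs, List.cons_append, List.foldl_cons, pvStepA,
      if_pos (by simp only [hp]; exact fun h => hcur s (by simp) h.symm), List.foldl_append]
    rw [show (b.foldl pvStepA ((if grp ≠ [] then acc ++ [grp] else acc), some p.2, [p.1]))
        = ((if grp ≠ [] then acc ++ [grp] else acc), some s, [p.1] ++ b.map (fun q => q.1)) by
      rw [hp]; exact pvFoldA_block b s (fun q hq => hg s (by simp) q (by simp [hgs, hq])) _ _]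
    rw [ih hDtail (fun t ht => hg t (by simp [ht])) (fun t ht => hne t (by simp [ht]))
      _ _ _ (fun t ht h => absurd (Option.some_injective _ h) (ne_of_gt (hDhead t ht)))]
    simp [hgs]
    split_ifs <;> simp


theorem pvGroups_keys (l : List (Int × Int)) :
    (l.foldl (fun d p => d.modify p.2 ([] : List Int) (fun v => v ++ [p.1]))
        PySem.Dict.empty).keys = PySem.Set.ofList (l.map (fun p => p.2)) := by
  rw [PySem.Dict.keys_foldl_modify_key l (fun p => p.2) ([] : List Int)
    (fun _ p v => v ++ [p.1]) PySem.Dict.empty]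
  rw [PySem.Dict.keys_empty]
  rfl




theorem pvGroups_getD (l : List (Int × Int)) (s : Int) :
    (l.foldl (fun d p => d.modify p.2 ([] : List Int) (fun v => v ++ [p.1]))
        PySem.Dict.empty).getD s [] = (pvBucket l s).map (fun p => p.1) := by
  have h := PySem.Dict.getD_foldl_modify_append (l.map (fun p => (p.2, p.1)))
    (PySem.Dict.empty) s
  rw [List.foldl_map] at h
  rw [h, PySem.Dict.getD_empty, List.filter_map, List.map_map]
  simp [pvBucket, Function.comp_def]


-- ===== VERDICT (by name: the statement is the Claim_ definition above) =====
theorem weighted_scoring_mMethod_spec : Claim_equal_weighted_scoring_mMethod := by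
  intro rankings _
  unfold Spec_weighted_scoring_mMethod weighted_scoring_mMethod weighted_scoring_mMethod_alt
  set l := (pvNodeScores rankings).items with hl
  set D := PySem.List.sorted (PySem.Set.ofList (l.map (fun p => p.2))) (fun s => s) true with hD
  have hDgt : D.Pairwise (· > ·) := pvSortedDesc_pairwise_gt _
  have hne : ∀ s ∈ D, pvBucket l s ≠ [] := by
    intro s hs
    have : s ∈ l.map (fun p => p.2) := by
      have := (PySem.List.mem_sorted _ _ _ s).mp hs
      exact (PySem.Set.mem_ofList _ _).mp this
    obtain ⟨p, hp, hps⟩ := List.mem_map.mp this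
    exact List.ne_nil_of_mem (List.mem_filter.mpr ⟨hp, by simp [hps]⟩)
  rw [pvSortedRev_blocks l,
    pvFoldA_groups D (pvBucket l) hDgt (fun s _ => pvBucket_key l s) hne [] none []
      (by intro s _; simp)]
  simp only [List.nil_append, if_neg (by simp : ¬([] : List Int) ≠ [])]
  rw [pvGroups_keys l, ← hD]
  exact List.map_congr_left (fun s _ => (pvGroups_getD l s).symm)
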